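-- pv_equiv track=rewrite | github.com/marcus-grant/infra | ansible/venv/lib/python3.10/site-packages/ansible_test/_internal/delegation.py | insert_options
-- ===== SOURCE A (Python) =====
-- def insert_options(command, options):
--     """Insert addition command line options into the given command and return the result."""
--     result = []
--
--     for arg in command:
--         if options and arg.startswith('--'):
--             result.extend(options)
--             options = None
--
--         result.append(arg)
--
--     return result
-- ===== SOURCE B (Python) =====
-- def insert_options(command, options):
--     """Insert addition command line options into the given command and return the result."""
--     idx = next((i for i, a in enumerate(command) if a.startswith('--')), None)
--     if not options or idx is None:
--         return list(command)
--     return list(command[:idx]) + list(options) + list(command[idx:])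
-- ===== Notes on version B (the rewrite author's own statement) =====
-- stated objective: simpler
-- what changed: Replaces the stateful accumulator loop with its options=None 'already inserted' sentinel by a locate-then-splice formulation: find the index of the first '--' argument, then return command[:idx] + options + command[idx:] (or a plain copy when options is empty or no '--' argument exists).
import Mathlib
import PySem

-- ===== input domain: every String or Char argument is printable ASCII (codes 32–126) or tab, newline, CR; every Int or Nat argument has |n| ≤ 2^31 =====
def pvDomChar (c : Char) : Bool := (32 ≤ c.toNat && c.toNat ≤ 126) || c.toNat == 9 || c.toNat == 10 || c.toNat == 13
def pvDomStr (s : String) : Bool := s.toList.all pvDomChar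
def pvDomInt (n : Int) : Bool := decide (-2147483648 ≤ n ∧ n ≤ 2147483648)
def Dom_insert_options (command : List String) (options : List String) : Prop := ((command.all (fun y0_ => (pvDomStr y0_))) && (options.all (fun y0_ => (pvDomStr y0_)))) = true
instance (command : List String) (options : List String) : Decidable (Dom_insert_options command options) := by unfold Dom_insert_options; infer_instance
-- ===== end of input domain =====

-- B replaces A's stateful accumulator loop (options=None sentinel) by locate-then-splice: simpler decomposition, same O(n) cost.

-- ===== PORT A =====
-- one loop step: state = (result so far, options — `none` models Python's `options = None`)
def insertOptionsStep (st : List String × Option (List String)) (arg : String) :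
    List String × Option (List String) :=
  match st with
  | (result, opts) =>
    match opts with
    | some o =>
      if o ≠ [] ∧ PySem.Str.startswith arg "--" then (result ++ o ++ [arg], none)
      else (result ++ [arg], some o)
    | none => (result ++ [arg], none)

def insert_options (command : List String) (options : List String) : List String :=
  (command.foldl insertOptionsStep ([], some options)).1

-- ===== PORT B =====
def insert_options_alt (command : List String) (options : List String) : List String :=
  match command.findIdx? (fun a => PySem.Str.startswith a "--") with
  | none => command
  | some idx =>
    if options = [] then command
    else command.take idx ++ options ++ command.drop idx

-- ===== PRECONDITION & SPEC =====
def Spec_insert_options (command : List String) (options : List String) (out : List String) : Prop := out = insert_options_alt command options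
instance (command : List String) (options : List String) (out : List String) : Decidable (Spec_insert_options command options out) := by unfold Spec_insert_options; infer_instance

-- ===== CLAIM (what is proved, stated in full; the proofs are below) =====
def Claim_equal_insert_options : Prop := ∀ (command : List String) (options : List String), Dom_insert_options command options → Spec_insert_options command options (insert_options command options)

-- ===== LEMMAS AND PROOFS =====

-- once options has been set to None, the loop just copies the rest of the command
theorem insert_options_loop_none (command : List String) (acc : List String) :
    (command.foldl insertOptionsStep (acc, none)).1 = acc ++ command := by
  induction command generalizing acc with
  | nil => simp
  | cons a l ih =>
    simp only [List.foldl_cons, insertOptionsStep]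
    rw [ih]
    simp

-- characterisation of the whole loop while options are still pending
theorem insert_options_loop_some (command : List String) (acc : List String) (o : List String) :
    (command.foldl insertOptionsStep (acc, some o)).1 =
      match command.findIdx? (fun a => PySem.Str.startswith a "--") with
      | none => acc ++ command
      | some idx =>
        if o = [] then acc ++ command
        else acc ++ command.take idx ++ o ++ command.drop idx := by
  induction command generalizing acc with
  | nil => simp
  | cons a l ih =>
    simp only [List.foldl_cons, insertOptionsStep, List.findIdx?_cons]
    by_cases hs : PySem.Str.startswith a "--"
    · by_cases ho : o = []
      · subst ho
        simp only [hs, ne_eq, not_true_eq_false, false_and, if_false]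
        rw [ih]
        cases List.findIdx? (fun a => PySem.Str.startswith a "--") l <;> simp
      · simp only [hs, ne_eq, ho, not_false_eq_true, true_and, if_true]
        rw [insert_options_loop_none]
        simp [ho]
    · rw [if_neg (fun h => hs h.2), ih]
      cases h : List.findIdx? (fun a => PySem.Str.startswith a "--") l with
      | none => rw [if_neg hs]; simp [h]
      | some i => rw [if_neg hs]; by_cases ho : o = [] <;> simp [h, ho]

-- ===== VERDICT (by name: the statement is the Claim_ definition above) =====
theorem insert_options_spec : Claim_equal_insert_options := by
  intro command options _
  show insert_options command options = insert_options_alt command options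
  unfold insert_options insert_options_alt
  rw [insert_options_loop_some]
  cases h : List.findIdx? (fun a => PySem.Str.startswith a "--") command with
  | none => simp
  | some i => by_cases ho : options = [] <;> simp [ho]
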